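-- pv_equiv track=rewrite | github.com/Akvarion/simod_docker | ros2_ws/src/ps_try/scripts/bt_ros2_demo-xml.py | _pick_model_index
-- ===== SOURCE A (Python) =====
-- from typing import Dict, List, Optional
--
-- def _pick_model_index(model_names: List[str], raw_candidates: List[str]) -> Optional[int]:
--     if not model_names:
--         return None
--     candidates = [str(c).lower() for c in (raw_candidates or []) if str(c).strip()]
--     if not candidates:
--         return None
--     lowered = [str(n).lower() for n in model_names]
--
--     # 1) match esatto
--     for cand in candidates:
--         for i, name in enumerate(lowered):
--             if name == cand:
--                 return i
--
--     # 2) match prefisso/suffisso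
--     for cand in candidates:
--         for i, name in enumerate(lowered):
--             if name.startswith(cand) or name.endswith(cand):
--                 return i
--
--     # 3) contains
--     for cand in candidates:
--         for i, name in enumerate(lowered):
--             if cand in name:
--                 return i
--
--     return None
-- ===== SOURCE B (Python) =====
-- from typing import List, Optional
--
-- def _pick_model_index(model_names: List[str], raw_candidates: List[str]) -> Optional[int]:
--     if not model_names:
--         return None
--     candidates = [str(c).lower() for c in (raw_candidates or []) if str(c).strip()]
--     if not candidates:
--         return None
--     lowered = [str(n).lower() for n in model_names]
--
--     # single argmin pass: priority 0 = exact (unbeatable, return at once),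
--     # 1 = prefix/suffix, 2 = substring; strict first-wins comparison reproduces
--     # the (priority, cand_idx, name_idx) tie-break of the prioritized passes
--     best = None  # (priority, name_index)
--     for cand in candidates:
--         for i, name in enumerate(lowered):
--             if name == cand:
--                 return i
--             if name.startswith(cand) or name.endswith(cand):
--                 p = 1
--             elif cand in name:
--                 p = 2
--             else:
--                 continue
--             if best is None or p < best[0]:
--                 best = (p, i)
--     return None if best is None else best[1]
-- ===== Notes on version B (the rewrite author's own statement) =====
-- stated objective: alternative
-- what changed: Replaces A's three prioritized early-returning nested passes over candidates x names with a single nested scan that classifies each pair once (priority 0 exact, 1 prefix/suffix, 2 substring) and keeps the first pair of strictly smallest priority (argmin with first-wins tie-break).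
import Mathlib
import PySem

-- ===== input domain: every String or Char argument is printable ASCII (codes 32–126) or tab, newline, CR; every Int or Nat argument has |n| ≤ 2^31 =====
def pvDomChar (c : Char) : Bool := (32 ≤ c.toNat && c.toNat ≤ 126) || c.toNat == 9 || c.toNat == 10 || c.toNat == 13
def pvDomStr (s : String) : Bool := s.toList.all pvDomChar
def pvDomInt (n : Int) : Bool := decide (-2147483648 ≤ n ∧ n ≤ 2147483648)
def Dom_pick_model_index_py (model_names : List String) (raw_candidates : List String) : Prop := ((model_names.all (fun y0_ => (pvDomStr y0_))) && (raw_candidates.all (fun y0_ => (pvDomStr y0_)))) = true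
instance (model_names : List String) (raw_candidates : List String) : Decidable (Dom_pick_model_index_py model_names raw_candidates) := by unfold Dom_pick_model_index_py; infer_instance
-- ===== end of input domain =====

-- B replaces A's three prioritized early-exit passes with one argmin-over-priority scan (alternative decomposition, same cost).

-- ===== PORT A =====
-- one pass of A: 'for cand in candidates: for i, name in enumerate(lowered): if test name cand: return i'
def pvPassA (test : String → String → Bool) (cands lowered : List String) : Option Int :=
  match cands with
  | [] => none
  | c :: rest =>
    match (PySem.List.enumerate lowered).find? (fun pr => test pr.2 c) with
    | some pr => some pr.1
    | none => pvPassA test rest lowered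

def pick_model_index_py (model_names : List String) (raw_candidates : List String) : Option Int :=
  if model_names.isEmpty then none
  else
    let candidates := raw_candidates.filterMap
      (fun c => if (PySem.Str.strip c).toList ≠ [] then some (PySem.Str.lower c) else none)
    if candidates.isEmpty then none
    else
      let lowered := model_names.map PySem.Str.lower
      match pvPassA (fun name cand => name == cand) candidates lowered with
      | some i => some i
      | none =>
        match pvPassA (fun name cand => PySem.Str.startswith name cand || PySem.Str.endswith name cand) candidates lowered with
        | some i => some i
        | none => pvPassA (fun name cand => PySem.Str.isIn cand name) candidates lowered

-- ===== PORT B =====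
-- priority of a non-exact (name, cand) pair: 1 prefix/suffix, 2 substring, none otherwise
def pvPrioNE (name cand : String) : Option Nat :=
  if PySem.Str.startswith name cand || PySem.Str.endswith name cand then some 1
  else if PySem.Str.isIn cand name then some 2
  else none

-- B's inner loop: '.inl i' is the early 'return i' on an exact match, '.inr best' falls through
def pvScanInner (c : String) : List (Int × String) → Option (Nat × Int) → Sum Int (Option (Nat × Int))
  | [], best => .inr best
  | pr :: tl, best =>
    if pr.2 == c then .inl pr.1
    else
      match pvPrioNE pr.2 c with
      | none => pvScanInner c tl best
      | some p =>
        pvScanInner c tl (if best.isNone || decide (p < (best.getD (0, 0)).1) then some (p, pr.1) else best)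

def pvScanOuter (lowered : List String) : List String → Option (Nat × Int) → Sum Int (Option (Nat × Int))
  | [], best => .inr best
  | c :: rest, best =>
    match pvScanInner c (PySem.List.enumerate lowered) best with
    | .inl i => .inl i
    | .inr best' => pvScanOuter lowered rest best'

def pick_model_index_py_alt (model_names : List String) (raw_candidates : List String) : Option Int :=
  if model_names.isEmpty then none
  else
    let candidates := raw_candidates.filterMap
      (fun c => if (PySem.Str.strip c).toList ≠ [] then some (PySem.Str.lower c) else none)
    if candidates.isEmpty then none
    else
      let lowered := model_names.map PySem.Str.lower
      match pvScanOuter lowered candidates none with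
      | .inl i => some i
      | .inr none => none
      | .inr (some b) => some b.2

-- ===== PRECONDITION & SPEC =====
def Spec_pick_model_index_py (model_names : List String) (raw_candidates : List String) (out : Option Int) : Prop := out = pick_model_index_py_alt model_names raw_candidates
instance (model_names : List String) (raw_candidates : List String) (out : Option Int) : Decidable (Spec_pick_model_index_py model_names raw_candidates out) := by unfold Spec_pick_model_index_py; infer_instance

-- ===== CLAIM (what is proved, stated in full; the proofs are below) =====
def Claim_equal_pick_model_index_py : Prop := ∀ (model_names : List String) (raw_candidates : List String), Dom_pick_model_index_py model_names raw_candidates → Spec_pick_model_index_py model_names raw_candidates (pick_model_index_py model_names raw_candidates)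

-- ===== LEMMAS AND PROOFS =====

-- combined priority of a (name, cand) pair: 0 exact, else pvPrioNE
def pvPrio (name cand : String) : Option Nat :=
  if name == cand then some 0
  else if PySem.Str.startswith name cand || PySem.Str.endswith name cand then some 1
  else if PySem.Str.isIn cand name then some 2
  else none

-- the ordered list of matched pairs (priority, name_index) for one candidate / for all candidates
def pvKeyF (c : String) : Int × String → Option (Nat × Int) :=
  fun pr => (pvPrio pr.2 c).map (fun p => (p, pr.1))

def pvKeys1 (lowered : List String) (c : String) : List (Nat × Int) :=
  (PySem.List.enumerate lowered).filterMap (pvKeyF c)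

def pvKeys (cands lowered : List String) : List (Nat × Int) :=
  cands.flatMap (fun c => pvKeys1 lowered c)

-- B's accumulator step on an already-classified key
def pvMinStep (b : Option (Nat × Int)) (x : Nat × Int) : Option (Nat × Int) :=
  match b with
  | none => some x
  | some b => if x.1 < b.1 then some x else some b

-- first strict minimum of a nonempty key list
def pvFirstMin (b : Nat × Int) : List (Nat × Int) → Nat × Int
  | [] => b
  | x :: T => if x.1 < b.1 then pvFirstMin x T else pvFirstMin b T

-- A's three-pass selection, expressed on the key list
def pvChain3 (L : List (Nat × Int)) : Option (Nat × Int) :=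
  match L.find? (fun x => x.1 ≤ 0) with
  | some x => some x
  | none =>
    match L.find? (fun x => x.1 ≤ 1) with
    | some x => some x
    | none => L.find? (fun x => x.1 ≤ 2)

theorem pvPrio_le_two {name cand : String} {p : Nat} (h : pvPrio name cand = some p) : p ≤ 2 := by
  unfold pvPrio at h
  split_ifs at h <;> simp_all <;> omega

-- test_k fires exactly on pairs with priority ≤ k (k = 0, 1, 2)
theorem pvTest0_iff (name cand : String) :
    (name == cand) = true ↔ ∃ p, pvPrio name cand = some p ∧ p ≤ 0 := by
  unfold pvPrio
  split_ifs with h1 h2 h3 <;> simp_all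

theorem pvTest1_iff (name cand : String) :
    (PySem.Str.startswith name cand || PySem.Str.endswith name cand) = true ↔
      ∃ p, pvPrio name cand = some p ∧ p ≤ 1 := by
  unfold pvPrio
  split_ifs with h1 h2 h3
  · simp only [beq_iff_eq] at h1
    subst h1
    simp [PySem.Chars.startswith_iff]
  · simp_all
  · simp_all
  · simp_all

theorem pvTest2_iff (name cand : String) :
    (PySem.Str.isIn cand name) = true ↔ ∃ p, pvPrio name cand = some p ∧ p ≤ 2 := by
  unfold pvPrio
  split_ifs with h1 h2 h3
  · simp only [beq_iff_eq] at h1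
    subst h1
    simp only [PySem.Str.isIn_eq, PySem.Chars.isIn_iff_infix]
    simp
  · rcases Bool.or_eq_true_iff.mp h2 with h | h
    · simp only [PySem.Str.startswith_eq, PySem.Chars.startswith_iff] at h
      simp only [PySem.Str.isIn_eq, PySem.Chars.isIn_iff_infix]
      simp [h.isInfix]
    · simp only [PySem.Str.endswith_eq, PySem.Chars.endswith_iff] at h
      simp only [PySem.Str.isIn_eq, PySem.Chars.isIn_iff_infix]
      simp [h.isInfix]
  · simp_all
  · simp_all

-- inner loop of one A-pass = find on the key list
theorem pvInner_eq (test : String → String → Bool) (k : Nat)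
    (htest : ∀ n c, test n c = true ↔ ∃ p, pvPrio n c = some p ∧ p ≤ k)
    (c : String) (es : List (Int × String)) :
    ((es.find? (fun pr => test pr.2 c)).map (fun pr => pr.1)) =
      (((es.filterMap (pvKeyF c)).find? (fun x => x.1 ≤ k)).map (fun x => x.2)) := by
  induction es with
  | nil => simp
  | cons hd tl ih =>
    simp only [List.find?, List.filterMap_cons, pvKeyF]
    cases hpr : pvPrio hd.2 c with
    | none =>
      have : test hd.2 c = false := by
        rw [← Bool.not_eq_true, htest]
        simp [hpr]
      simp only [this, Option.map_none]
      exact ih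
    | some p =>
      by_cases hk : p ≤ k
      · have : test hd.2 c = true := (htest _ _).mpr ⟨p, hpr, hk⟩
        simp [this, hk]
      · have : test hd.2 c = false := by
          rw [← Bool.not_eq_true, htest]
          simp only [hpr, Option.some.injEq, not_exists, not_and]
          rintro q hq
          cases hq; omega
        simp only [this, Option.map_some, List.find?, hk, decide_false]
        exact ih

-- one A-pass = find on the flattened key list
theorem pvPassA_eq (test : String → String → Bool) (k : Nat)
    (htest : ∀ n c, test n c = true ↔ ∃ p, pvPrio n c = some p ∧ p ≤ k)
    (cands lowered : List String) :
    pvPassA test cands lowered =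
      ((pvKeys cands lowered).find? (fun x => x.1 ≤ k)).map (fun x => x.2) := by
  induction cands with
  | nil => simp [pvPassA, pvKeys]
  | cons c rest ih =>
    have hinner := pvInner_eq test k htest c (PySem.List.enumerate lowered)
    simp only [pvPassA, pvKeys, List.flatMap_cons, List.find?_append]
    cases hfi : (PySem.List.enumerate lowered).find? (fun pr => test pr.2 c) with
    | some pr =>
      have hthis : ((pvKeys1 lowered c).find? (fun x => x.1 ≤ k)).map (fun x => x.2) = some pr.1 := by
        rw [pvKeys1, ← hinner, hfi]; rfl
      cases hfk : (pvKeys1 lowered c).find? (fun x => x.1 ≤ k) with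
      | none => rw [hfk] at hthis; simp at hthis
      | some x =>
        rw [hfk] at hthis
        simp only [Option.map_some, Option.some.injEq] at hthis
        simp [hthis]
    | none =>
      have hthis : ((pvKeys1 lowered c).find? (fun x => x.1 ≤ k)).map (fun x => x.2) = none := by
        rw [pvKeys1, ← hinner, hfi]; rfl
      cases hfk : (pvKeys1 lowered c).find? (fun x => x.1 ≤ k) with
      | some x => rw [hfk] at hthis; simp at hthis
      | none =>
        simp only [Option.none_or]
        rw [ih, pvKeys]

-- a best of priority 0 is never displaced
theorem pvFoldMin_keep0 (L : List (Nat × Int)) (x : Nat × Int) (hx : x.1 = 0) :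
    L.foldl pvMinStep (some x) = some x := by
  induction L with
  | nil => rfl
  | cons y L ih =>
    simp only [List.foldl_cons, pvMinStep, hx]
    simp
    exact ih

def pvEmbed : Sum Int (Option (Nat × Int)) → Option (Nat × Int)
  | .inl i => some (0, i)
  | .inr b => b

theorem pvPrioNE_ge_one {name cand : String} {p : Nat} (h : pvPrioNE name cand = some p) : 1 ≤ p := by
  unfold pvPrioNE at h
  split_ifs at h <;> first | (simp_all; omega) | simp_all

theorem pvPrio_of_ne {name cand : String} (h : (name == cand) = false) :
    pvPrio name cand = pvPrioNE name cand := by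
  simp [pvPrio, pvPrioNE, h]

theorem pvPrio_of_eq {name cand : String} (h : (name == cand) = true) :
    pvPrio name cand = some 0 := by
  simp [pvPrio, h]

-- if no exact match stops the inner scan, the running best keeps priority ≥ 1
theorem pvScanInner_inv (c : String) (es : List (Int × String)) :
    ∀ (b b' : Option (Nat × Int)), (∀ x, b = some x → 1 ≤ x.1) →
      pvScanInner c es b = .inr b' → (∀ x, b' = some x → 1 ≤ x.1) := by
  induction es with
  | nil =>
    intro b b' hb h
    simp only [pvScanInner, Sum.inr.injEq] at h
    subst h; exact hb
  | cons pr tl ih =>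
    intro b b' hb h
    simp only [pvScanInner] at h
    split_ifs at h with hex
    · cases hpr : pvPrioNE pr.2 c with
      | none => rw [hpr] at h; exact ih b b' hb h
      | some p =>
        rw [hpr] at h
        refine ih _ b' ?_ h
        intro x hx
        split_ifs at hx with hcond
        · cases hx; exact pvPrioNE_ge_one hpr
        · exact hb x hx

-- the early-exit inner scan computes the pvMinStep fold over the key list
theorem pvScanInner_eq (c : String) (es : List (Int × String)) :
    ∀ (b : Option (Nat × Int)), (∀ x, b = some x → 1 ≤ x.1) →
      pvEmbed (pvScanInner c es b) = (es.filterMap (pvKeyF c)).foldl pvMinStep b := by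
  induction es with
  | nil => intro b hb; simp [pvScanInner, pvEmbed]
  | cons pr tl ih =>
    intro b hb
    simp only [pvScanInner, List.filterMap_cons, pvKeyF]
    by_cases hex : (pr.2 == c) = true
    · rw [pvPrio_of_eq hex]
      simp only [hex, if_true, Option.map_some, List.foldl_cons]
      have hstep : pvMinStep b (0, pr.1) = some (0, pr.1) := by
        cases hbv : b with
        | none => rfl
        | some x =>
          have := hb x hbv
          simp only [pvMinStep]
          have : (0 : Nat) < x.1 := by omega
          simp [this]
      rw [hstep, pvFoldMin_keep0 _ _ rfl]
      rfl
    · rw [pvPrio_of_ne (Bool.not_eq_true _ ▸ hex)]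
      simp only [hex]
      cases hpr : pvPrioNE pr.2 c with
      | none => simp only [Option.map_none]; exact ih b hb
      | some p =>
        simp only [Option.map_some, List.foldl_cons]
        have hp1 : 1 ≤ p := pvPrioNE_ge_one hpr
        have hstep : (if b.isNone || decide (p < (b.getD (0, 0)).1) then some (p, pr.1) else b) =
            pvMinStep b (p, pr.1) := by
          cases b with
          | none => rfl
          | some x => simp [pvMinStep]
        rw [hstep]
        refine ih _ ?_
        intro x hx
        cases hbv : (pvMinStep b (p, pr.1)) with
        | none => simp [hbv] at hx
        | some y =>
          rw [hbv] at hx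
          cases hx
          cases hb2 : b with
          | none => rw [hb2] at hbv; cases hbv; omega
          | some z =>
            have hz := hb z hb2
            rw [hb2] at hbv
            simp only [pvMinStep] at hbv
            split_ifs at hbv <;> cases hbv <;> omega

-- the early-exit outer scan computes the pvMinStep fold over the flattened key list
theorem pvScanOuter_eq (lowered : List String) (cands : List String) :
    ∀ (b : Option (Nat × Int)), (∀ x, b = some x → 1 ≤ x.1) →
      pvEmbed (pvScanOuter lowered cands b) = (pvKeys cands lowered).foldl pvMinStep b := by
  induction cands with
  | nil => intro b hb; simp [pvScanOuter, pvEmbed, pvKeys]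
  | cons c rest ih =>
    intro b hb
    simp only [pvScanOuter, pvKeys, List.flatMap_cons, List.foldl_append]
    cases hsc : pvScanInner c (PySem.List.enumerate lowered) b with
    | inl i =>
      have h2 := pvScanInner_eq c (PySem.List.enumerate lowered) b hb
      rw [hsc] at h2
      have h2' : (pvKeys1 lowered c).foldl pvMinStep b = some ((0 : Nat), i) := by
        rw [pvKeys1]; exact h2.symm
      rw [h2', pvFoldMin_keep0 _ _ rfl]
      rfl
    | inr b' =>
      have h2 := pvScanInner_eq c (PySem.List.enumerate lowered) b hb
      rw [hsc] at h2
      have h2' : b' = (pvKeys1 lowered c).foldl pvMinStep b := by rw [pvKeys1]; exact h2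
      have hb' := pvScanInner_inv c (PySem.List.enumerate lowered) b b' hb hsc
      rw [ih b' hb', h2', pvKeys]

theorem pvFoldMin_some (T : List (Nat × Int)) (b : Nat × Int) :
    T.foldl pvMinStep (some b) = some (pvFirstMin b T) := by
  induction T generalizing b with
  | nil => rfl
  | cons x T ih =>
    simp only [List.foldl_cons, pvFirstMin, pvMinStep]
    split_ifs with h <;> simp [ih]

theorem pvKeys_le_two (cands lowered : List String) :
    ∀ x ∈ pvKeys cands lowered, x.1 ≤ 2 := by
  intro x hx
  simp only [pvKeys, List.mem_flatMap, pvKeys1, List.mem_filterMap, pvKeyF] at hx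
  obtain ⟨c, -, pr, -, hmap⟩ := hx
  cases hp : pvPrio pr.2 c with
  | none => rw [hp] at hmap; simp at hmap
  | some p =>
    rw [hp] at hmap
    simp only [Option.map_some, Option.some.injEq] at hmap
    cases hmap
    exact pvPrio_le_two hp

-- core: the first strict minimum is what the three prioritized finds select
theorem pvFirstMin_eq_chain (T : List (Nat × Int)) (b : Nat × Int)
    (hb : b.1 ≤ 2) (hT : ∀ x ∈ T, x.1 ≤ 2) :
    some (pvFirstMin b T) = pvChain3 (b :: T) := by
  induction T generalizing b with
  | nil =>
    by_cases h0 : b.1 ≤ 0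
    · simp [pvFirstMin, pvChain3, List.find?, h0]
    · by_cases h1 : b.1 ≤ 1
      · simp [pvFirstMin, pvChain3, List.find?, h0, h1]
      · simp [pvFirstMin, pvChain3, List.find?, h0, h1, hb]
  | cons x T ih =>
    have hx : x.1 ≤ 2 := hT x (by simp)
    have hT' : ∀ y ∈ T, y.1 ≤ 2 := fun y hy => hT y (by simp [hy])
    simp only [pvFirstMin]
    split_ifs with hlt
    · -- x strictly improves on b; b (priority ≥ 1) is invisible to the chain
      rw [ih x hx hT']
      simp only [pvChain3, List.find?]
      have hb1 : ¬ b.1 ≤ 0 := by omega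
      simp only [hb1, decide_false]
      by_cases hx0 : x.1 ≤ 0
      · simp [hx0]
      · simp only [hx0, decide_false]
        have hx1 : x.1 ≤ 1 := by omega
        by_cases hb1' : b.1 ≤ 1
        · omega
        · simp only [hb1', decide_false]
          cases hf0 : T.find? (fun y => decide (y.1 ≤ 0)) with
          | some y => simp
          | none => simp [hx1]
    · -- b stays; x (priority ≥ b's) is hidden behind b
      rw [ih b hb hT']
      simp only [pvChain3, List.find?]
      by_cases hb0 : b.1 ≤ 0
      · simp [hb0]
      · simp only [hb0, decide_false]
        have hx0 : ¬ x.1 ≤ 0 := by omega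
        simp only [hx0, decide_false]
        by_cases hb1 : b.1 ≤ 1
        · simp [hb1]
        · simp only [hb1, decide_false]
          have hx1 : ¬ x.1 ≤ 1 := by omega
          simp only [hx1, decide_false]
          by_cases hb2 : b.1 ≤ 2
          · simp [hb2]
          · omega

theorem pvFold_eq_chain (L : List (Nat × Int)) (hL : ∀ x ∈ L, x.1 ≤ 2) :
    L.foldl pvMinStep none = pvChain3 L := by
  cases L with
  | nil => rfl
  | cons b T =>
    have hb : b.1 ≤ 2 := hL b (by simp)
    have hT : ∀ x ∈ T, x.1 ≤ 2 := fun x hx => hL x (by simp [hx])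
    simp only [List.foldl_cons]
    have hstep : pvMinStep none b = some b := rfl
    rw [hstep, pvFoldMin_some]
    exact pvFirstMin_eq_chain T b hb hT

-- ===== VERDICT (by name: the statement is the Claim_ definition above) =====
theorem pick_model_index_py_spec : Claim_equal_pick_model_index_py := by
  intro model_names raw_candidates _
  unfold Spec_pick_model_index_py pick_model_index_py pick_model_index_py_alt
  by_cases hmn : model_names.isEmpty
  · simp [hmn]
  · simp only [hmn]
    set candidates := raw_candidates.filterMap
      (fun c => if (PySem.Str.strip c).toList ≠ [] then some (PySem.Str.lower c) else none) with hc
    by_cases hcd : candidates.isEmpty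
    · simp [hcd]
    · simp only [hcd]
      set lowered := model_names.map PySem.Str.lower with hl
      rw [pvPassA_eq _ 0 pvTest0_iff, pvPassA_eq _ 1 pvTest1_iff, pvPassA_eq _ 2 pvTest2_iff]
      have hscan := pvScanOuter_eq lowered candidates none (by intro x hx; cases hx)
      rw [pvFold_eq_chain _ (pvKeys_le_two candidates lowered)] at hscan
      unfold pvChain3 at hscan
      cases h0 : (pvKeys candidates lowered).find? (fun x => x.1 ≤ 0) with
      | some x =>
        rw [h0] at hscan
        simp only [Option.map_some]
        cases hsc : pvScanOuter lowered candidates none with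
        | inl i =>
          rw [hsc] at hscan
          have : ((0 : Nat), i) = x := by simpa [pvEmbed] using hscan
          simp [← this]
        | inr b =>
          rw [hsc] at hscan
          have : b = some x := hscan
          simp [this]
      | none =>
        rw [h0] at hscan
        simp only [Option.map_none]
        cases h1 : (pvKeys candidates lowered).find? (fun x => x.1 ≤ 1) with
        | some x =>
          rw [h1] at hscan
          simp only [Option.map_some]
          cases hsc : pvScanOuter lowered candidates none with
          | inl i =>
            rw [hsc] at hscan
            have : ((0 : Nat), i) = x := by simpa [pvEmbed] using hscan
            simp [← this]
          | inr b =>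
            rw [hsc] at hscan
            have : b = some x := hscan
            simp [this]
        | none =>
          rw [h1] at hscan
          simp only [Option.map_none]
          cases hsc : pvScanOuter lowered candidates none with
          | inl i =>
            rw [hsc] at hscan
            have h2 : (pvKeys candidates lowered).find? (fun x => x.1 ≤ 2) = some ((0 : Nat), i) := by
              simpa [pvEmbed] using hscan.symm
            simp [h2]
          | inr b =>
            rw [hsc] at hscan
            have h2 : (pvKeys candidates lowered).find? (fun x => x.1 ≤ 2) = b := hscan.symm
            rw [h2]
            cases b <;> simp
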